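-- pv_equiv track=rewrite | github.com/kaluginpeter/Algorithms_and_structures_tasks | CodeWars/4kyu/Text_align_justify.py | calc_whitespaces
-- ===== SOURCE A (Python) =====
-- def calc_whitespaces(count_spaces: int, needed_spaces: int) -> list[int]:
--     if needed_spaces == 0: return count_spaces
--     if count_spaces % needed_spaces == 0:
--         return [count_spaces // needed_spaces for _ in range(needed_spaces)]
--     space_size: int = 1
--     while needed_spaces * space_size < count_spaces:
--         space_size += 1
--     output: list[int] = [space_size for _ in range(needed_spaces)]
--     for idx in range(-1, -(space_size * needed_spaces - count_spaces) - 1, -1):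
--         output[idx] -= 1
--     return output
-- ===== SOURCE B (Python) =====
-- def calc_whitespaces(count_spaces: int, needed_spaces: int) -> list[int]:
--     if needed_spaces == 0:
--         return count_spaces
--     q, r = divmod(count_spaces, needed_spaces)
--     return [q + 1] * r + [q] * (needed_spaces - r)
-- ===== Notes on version B (the rewrite author's own statement) =====
-- stated objective: simpler
-- what changed: Replaces A's incremental ceil-search while-loop plus build-then-decrement correction pass with a single divmod and a closed-form concatenation of two homogeneous runs ([q+1]*r ++ [q]*(n-r)).
-- outside the precondition, e.g. on calc_whitespaces(5, 0): A returns 5, B returns 5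
-- crash fix: On needed_spaces > 0 with count_spaces < 0 not divisible, and on needed_spaces < 0 with count_spaces < needed_spaces not divisible, A raises IndexError in its decrement pass while B returns the divmod distribution (e.g. [0, -1] for (-1, 2)). — e.g. on calc_whitespaces(-1, 2): A raises IndexError, B returns [0, -1]
import Mathlib
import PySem

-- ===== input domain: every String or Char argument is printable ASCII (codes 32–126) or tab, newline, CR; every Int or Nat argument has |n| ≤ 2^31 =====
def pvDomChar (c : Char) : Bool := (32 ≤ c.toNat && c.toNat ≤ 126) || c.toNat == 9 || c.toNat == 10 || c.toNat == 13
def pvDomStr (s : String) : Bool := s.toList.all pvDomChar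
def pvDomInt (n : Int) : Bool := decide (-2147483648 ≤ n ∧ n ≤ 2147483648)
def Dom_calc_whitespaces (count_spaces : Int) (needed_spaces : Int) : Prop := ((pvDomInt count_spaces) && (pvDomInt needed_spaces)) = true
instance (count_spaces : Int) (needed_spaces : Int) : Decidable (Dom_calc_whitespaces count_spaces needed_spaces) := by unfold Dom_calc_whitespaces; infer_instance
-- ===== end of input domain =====

-- B replaces A's ceil-search while-loop and decrement correction pass by a closed-form divmod split (objective: simpler).

-- ===== PORT A =====
-- the `while needed_spaces * space_size < count_spaces: space_size += 1` loop;
-- fuel count_spaces.toNat is enough on every input admitted by Pre_ (proved in pvCeilLoop_eq below)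
def pvCeilLoop (fuel : Nat) (cs ns ss : Int) : Int :=
  match fuel with
  | 0 => ss
  | f + 1 => if ns * ss < cs then pvCeilLoop f cs ns (ss + 1) else ss

-- `output[idx] -= 1`; Python raises IndexError when idx is out of range — such inputs are outside Pre_
def pvDec (l : List Int) (idx : Int) : List Int :=
  PySem.List.pySetD l idx (PySem.List.pyGetD l idx 0 - 1)

def calc_whitespaces (count_spaces : Int) (needed_spaces : Int) : List Int :=
  if needed_spaces = 0 then []  -- Python returns the bare int count_spaces here (not a list); outside Pre_
  else if PySem.Int.mod count_spaces needed_spaces = 0 then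
    (PySem.List.pyRange 0 needed_spaces 1).map
      (fun _ => PySem.Int.floordiv count_spaces needed_spaces)
  else
    let space_size := pvCeilLoop count_spaces.toNat count_spaces needed_spaces 1
    let output := (PySem.List.pyRange 0 needed_spaces 1).map (fun _ => space_size)
    (PySem.List.pyRange (-1) (-(space_size * needed_spaces - count_spaces) - 1) (-1)).foldl
      pvDec output

-- ===== PORT B =====
def calc_whitespaces_alt (count_spaces : Int) (needed_spaces : Int) : List Int :=
  if needed_spaces = 0 then []  -- Python returns the bare int count_spaces here (not a list); outside Pre_
  else
    let q := PySem.Int.floordiv count_spaces needed_spaces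
    let r := PySem.Int.mod count_spaces needed_spaces
    List.replicate r.toNat (q + 1) ++ List.replicate (needed_spaces - r).toNat q

-- ===== PRECONDITION & SPEC =====
-- Pre_ excludes needed_spaces = 0, where A returns a bare int instead of a list, and the
-- not-exactly-divisible inputs with needed_spaces < 0 or count_spaces < 0, where A raises
-- IndexError in its decrement pass or loops forever in its ceil search.
def Pre_calc_whitespaces (count_spaces : Int) (needed_spaces : Int) : Prop :=
  (0 < needed_spaces ∧ (0 ≤ count_spaces ∨ PySem.Int.mod count_spaces needed_spaces = 0)) ∨
    (needed_spaces < 0 ∧ PySem.Int.mod count_spaces needed_spaces = 0)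
instance (count_spaces : Int) (needed_spaces : Int) : Decidable (Pre_calc_whitespaces count_spaces needed_spaces) := by unfold Pre_calc_whitespaces; infer_instance

def pvWitness_calc_whitespaces : Int × Int := (7, 3)

-- On needed_spaces > 0 with count_spaces < 0 not divisible, and on needed_spaces < 0 with
-- count_spaces < needed_spaces not divisible, A raises IndexError in its decrement pass while
-- B returns the divmod distribution.
def Raises_calc_whitespaces (count_spaces : Int) (needed_spaces : Int) : Prop :=
  PySem.Int.mod count_spaces needed_spaces ≠ 0 ∧
    ((0 < needed_spaces ∧ count_spaces < 0) ∨ (needed_spaces < 0 ∧ count_spaces < needed_spaces))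
instance (count_spaces : Int) (needed_spaces : Int) : Decidable (Raises_calc_whitespaces count_spaces needed_spaces) := by unfold Raises_calc_whitespaces; infer_instance

def pvRaiseWitness_calc_whitespaces : Int × Int := (-1, 2)
def pvRaiseWitnessOut_calc_whitespaces : List Int := [0, -1]

def Spec_calc_whitespaces (count_spaces : Int) (needed_spaces : Int) (out : List Int) : Prop := out = calc_whitespaces_alt count_spaces needed_spaces
instance (count_spaces : Int) (needed_spaces : Int) (out : List Int) : Decidable (Spec_calc_whitespaces count_spaces needed_spaces out) := by unfold Spec_calc_whitespaces; infer_instance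

-- ===== CLAIM (what is proved, stated in full; the proofs are below) =====
def Claim_equal_calc_whitespaces : Prop := ∀ (count_spaces : Int) (needed_spaces : Int), Dom_calc_whitespaces count_spaces needed_spaces → Pre_calc_whitespaces count_spaces needed_spaces → Spec_calc_whitespaces count_spaces needed_spaces (calc_whitespaces count_spaces needed_spaces)
def Claim_raises_calc_whitespaces : Prop := (∀ (count_spaces : Int) (needed_spaces : Int), Dom_calc_whitespaces count_spaces needed_spaces → Raises_calc_whitespaces count_spaces needed_spaces → ¬ Pre_calc_whitespaces count_spaces needed_spaces) ∧ (Dom_calc_whitespaces (pvRaiseWitness_calc_whitespaces.1) (pvRaiseWitness_calc_whitespaces.2) ∧ Raises_calc_whitespaces (pvRaiseWitness_calc_whitespaces.1) (pvRaiseWitness_calc_whitespaces.2) ∧ calc_whitespaces_alt (pvRaiseWitness_calc_whitespaces.1) (pvRaiseWitness_calc_whitespaces.2) = pvRaiseWitnessOut_calc_whitespaces)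

-- ===== LEMMAS AND PROOFS =====

-- the while loop computes the least t ≥ ss with ns * t ≥ cs, given enough fuel
theorem pvCeilLoop_eq (cs ns t : Int) (hns : 0 < ns) :
    ∀ (fuel : Nat) (ss : Int), ss ≤ t → cs ≤ ns * t → ns * (t - 1) < cs →
      (t - ss).toNat ≤ fuel → pvCeilLoop fuel cs ns ss = t := by
  intro fuel
  induction fuel with
  | zero =>
    intro ss h1 h2 h3 h4
    have : ss = t := by omega
    simpa [pvCeilLoop] using this
  | succ f ih =>
    intro ss h1 h2 h3 h4
    by_cases h : ns * ss < cs
    · have hlt : ss < t := by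
        rcases lt_or_eq_of_le h1 with h' | h'
        · exact h'
        · subst h'; omega
      rw [pvCeilLoop, if_pos h]
      exact ih (ss + 1) (by omega) h2 h3 (by omega)
    · have : t - 1 < ss := by
        have hle : cs ≤ ns * ss := by omega
        nlinarith
      have : ss = t := by omega
      rw [pvCeilLoop, if_neg h]
      exact this

theorem map_const_pyRange (n c : Int) :
    (PySem.List.pyRange 0 n 1).map (fun _ => c) = List.replicate n.toNat c := by
  rw [PySem.List.pyRange_one]
  simp [Function.comp_def, List.map_const']

theorem pyRange_neg_one (k : Nat) :
    PySem.List.pyRange (-1) (-(k : Int) - 1) (-1) = (List.range k).map (fun j : Nat => -1 - (j : Int)) := by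
  have h1 : ((-1 : Int) = 0) = False := by simp
  rcases Nat.eq_zero_or_pos k with hk | hk
  · subst hk; simp [PySem.List.pyRange]
  · simp only [PySem.List.pyRange]
    rw [if_neg (by norm_num), if_neg (by norm_num), if_pos (by omega : (-(k : Int) - 1) < -1)]
    have : ((-1 : Int) - (-(k : Int) - 1) + - -1 - 1) / -(-1) = (k : Int) := by
      push_cast; ring_nf
      exact Int.ediv_one _ ▸ rfl
    rw [this, Int.toNat_natCast]
    apply List.map_congr_left
    intro j _
    ring

-- decrementing at indices -1, -2, …, -k turns the last k entries of replicate n x into x - 1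
theorem decFold (x : Int) : ∀ (k n : Nat), k ≤ n →
    (List.range k).foldl (fun (l : List Int) (j : Nat) => pvDec l (-1 - (j : Int))) (List.replicate n x)
      = List.replicate (n - k) x ++ List.replicate k (x - 1) := by
  intro k
  induction k with
  | zero => intro n _; simp
  | succ k ih =>
    intro n hk
    rw [List.range_succ, List.foldl_append, ih n (by omega)]
    simp only [List.foldl_cons, List.foldl_nil]
    -- one more decrement at index -1 - k, i.e. position n - (k+1)
    have hlen : (List.replicate (n - k) x ++ List.replicate k (x - 1)).length = n := by
      simp; omega
    have hidx : PySem.List.pyIdx? n (-1 - (k : Int)) = some (n - (k + 1)) := by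
      simp only [PySem.List.pyIdx?]
      rw [if_neg (by omega), if_pos (by omega)]
      congr 1
      omega
    unfold pvDec PySem.List.pySetD PySem.List.pySet? PySem.List.pyGetD PySem.List.pyGet?
    rw [hlen, hidx]
    simp only [Option.map_some, Option.bind_some, Option.getD_some]
    have hpos : n - (k + 1) < n - k := by omega
    have hget : (List.replicate (n - k) x ++ List.replicate k (x - 1))[n - (k + 1)]? = some x := by
      rw [List.getElem?_append_left (by simp; omega)]
      simp [hpos]
    rw [hget]
    simp only [Option.getD_some]
    -- now the set: position n-(k+1) is the last slot of the replicate (n-k) x prefix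
    have hnk : n - k = (n - (k + 1)) + 1 := by omega
    rw [hnk, List.replicate_succ' (n := n - (k + 1)), List.append_assoc, List.set_append]
    rw [if_neg (by simp), List.length_replicate, Nat.sub_self, List.singleton_append,
      List.set_cons_zero, ← List.replicate_succ]

theorem calc_whitespaces_agree (cs ns : Int)
    (hpre : Pre_calc_whitespaces cs ns) :
    calc_whitespaces cs ns = calc_whitespaces_alt cs ns := by
  rcases hpre with ⟨hns, hcs⟩ | ⟨hns, hm⟩
  case inr =>
    -- needed_spaces < 0 and exactly divisible: both sides are the empty list
    have hns0 : ns ≠ 0 := by omega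
    rw [calc_whitespaces, calc_whitespaces_alt, if_neg hns0, if_neg hns0, if_pos hm]
    rw [map_const_pyRange, hm]
    simp [Int.toNat_of_nonpos (by omega : ns ≤ 0)]
  case inl =>
    have hns0 : ns ≠ 0 := by omega
    have hmod : PySem.Int.mod cs ns = cs % ns := PySem.Int.mod_eq_emod_of_pos hns
    have hdiv : PySem.Int.floordiv cs ns = cs / ns := PySem.Int.floordiv_eq_ediv_of_pos hns
    have hr0 : 0 ≤ cs % ns := Int.emod_nonneg cs hns0
    have hrlt : cs % ns < ns := Int.emod_lt_of_pos cs hns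
    have heq : ns * (cs / ns) + cs % ns = cs := Int.mul_ediv_add_emod cs ns
    by_cases hm : PySem.Int.mod cs ns = 0
    · -- exactly divisible: both are replicate ns.toNat (cs // ns)
      rw [calc_whitespaces, calc_whitespaces_alt, if_neg hns0, if_neg hns0, if_pos hm]
      rw [map_const_pyRange, hm]
      simp
    · -- not divisible: cs ≥ 1 and the loop finds q + 1
      have hrpos : 0 < cs % ns := by rw [hmod] at hm; omega
      have hcs0 : 0 ≤ cs := by
        rcases hcs with h | h
        · exact h
        · exact absurd h hm
      have hq0 : 0 ≤ cs / ns := Int.ediv_nonneg hcs0 (by omega)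
      have hqle : cs / ns ≤ cs := Int.ediv_le_self ns hcs0
      have hloop : pvCeilLoop cs.toNat cs ns 1 = cs / ns + 1 :=
        pvCeilLoop_eq cs ns (cs / ns + 1) hns cs.toNat 1 (by omega)
          (by nlinarith [heq, hrlt]) (by simpa using (by nlinarith [heq, hrpos] : ns * (cs / ns) < cs))
          (by omega)
      rw [calc_whitespaces, calc_whitespaces_alt, if_neg hns0, if_neg hns0, if_neg hm]
      simp only [hloop, map_const_pyRange]
      have hkint : (cs / ns + 1) * ns - cs = ns - cs % ns := by nlinarith [heq]
      have hknn : 0 ≤ ns - cs % ns := by omega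
      have hkcast : ns - cs % ns = ((ns - cs % ns).toNat : Int) := by omega
      rw [hkint, hkcast, pyRange_neg_one, List.foldl_map]
      rw [decFold (cs / ns + 1) (ns - cs % ns).toNat ns.toNat (by omega)]
      rw [hmod, hdiv]
      have h1 : ns.toNat - (ns - cs % ns).toNat = (cs % ns).toNat := by omega
      rw [h1]
      simp

-- ===== VERDICT (by name: the statement is the Claim_ definition above) =====
theorem calc_whitespaces_spec : Claim_equal_calc_whitespaces := by
  intro cs ns _ hpre
  unfold Spec_calc_whitespaces
  exact calc_whitespaces_agree cs ns hpre

@[simp]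
theorem calc_whitespaces_raises : Claim_raises_calc_whitespaces := by
  unfold Claim_raises_calc_whitespaces
  constructor
  · intro cs ns _ hr hpre
    obtain ⟨hm, hcase⟩ := hr
    rcases hpre with ⟨hns, hcs⟩ | ⟨hns, hdvd⟩
    · rcases hcase with ⟨_, hneg⟩ | ⟨hnsneg, _⟩
      · rcases hcs with h | h
        · omega
        · exact hm h
      · omega
    · exact hm hdvd
  · exact ⟨by decide, by decide, by decide⟩
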